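-- pv_equiv track=rewrite | github.com/bilsengroup/future-key-dev | method1/feature_extraction/1-DevsInitialization_Postprocess_2.py | sort_keys
-- ===== SOURCE A (Python) =====
-- def sort_keys(keys):
--     sorted_keys = []
--     for key in keys:
--         if ' ' in key:
--             sorted_keys.append(key)
--     for key in keys:
--         if ' ' not in key:
--             sorted_keys.append(key)
--     return sorted_keys
-- ===== SOURCE B (Python) =====
-- def sort_keys(keys):
--     spaced = []
--     spaceless = []
--     for key in keys:
--         if ' ' in key:
--             spaced.append(key)
--         else:
--             spaceless.append(key)
--     return spaced + spaceless
-- ===== Notes on version B (the rewrite author's own statement) =====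
-- stated objective: simpler
-- what changed: B partitions in a single traversal maintaining two accumulator lists (spaced/spaceless) and concatenates them, instead of A's two full scans over the input.
import Mathlib
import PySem

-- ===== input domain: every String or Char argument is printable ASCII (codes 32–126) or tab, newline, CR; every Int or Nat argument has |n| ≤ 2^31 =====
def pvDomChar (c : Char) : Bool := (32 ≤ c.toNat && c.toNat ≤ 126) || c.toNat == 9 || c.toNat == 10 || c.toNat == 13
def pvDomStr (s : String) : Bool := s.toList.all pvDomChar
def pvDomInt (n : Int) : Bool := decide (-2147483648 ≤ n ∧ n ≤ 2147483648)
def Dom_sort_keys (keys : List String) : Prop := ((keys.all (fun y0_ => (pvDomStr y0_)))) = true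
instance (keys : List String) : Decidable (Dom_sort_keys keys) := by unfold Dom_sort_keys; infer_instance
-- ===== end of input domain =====

-- B is a single-pass partition with two accumulators instead of A's two scans; objective: simpler.

-- ===== PORT A =====
def sort_keys (keys : List String) : List String :=
  let sorted_keys :=
    keys.foldl (fun acc key => if PySem.Str.isIn " " key then acc ++ [key] else acc) []
  keys.foldl (fun acc key => if !(PySem.Str.isIn " " key) then acc ++ [key] else acc) sorted_keys

-- ===== PORT B =====
def sort_keys_alt (keys : List String) : List String :=
  let p :=
    keys.foldl
      (fun (p : List String × List String) key =>
        if PySem.Str.isIn " " key then (p.1 ++ [key], p.2) else (p.1, p.2 ++ [key]))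
      ([], [])
  p.1 ++ p.2

-- ===== PRECONDITION & SPEC =====
def Spec_sort_keys (keys : List String) (out : List String) : Prop := out = sort_keys_alt keys
instance (keys : List String) (out : List String) : Decidable (Spec_sort_keys keys out) := by unfold Spec_sort_keys; infer_instance

-- ===== CLAIM (what is proved, stated in full; the proofs are below) =====
def Claim_equal_sort_keys : Prop := ∀ (keys : List String), Dom_sort_keys keys → Spec_sort_keys keys (sort_keys keys)

-- ===== LEMMAS AND PROOFS =====
theorem foldl_pair_partition (p : String → Bool) (keys a b : List String) :
    keys.foldl
      (fun (q : List String × List String) key =>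
        if p key then (q.1 ++ [key], q.2) else (q.1, q.2 ++ [key]))
      (a, b)
    = (a ++ keys.filter p, b ++ keys.filter (fun k => !(p k))) := by
  induction keys generalizing a b with
  | nil => simp
  | cons k ks ih =>
    by_cases h : p k
    · simp [List.foldl_cons, h, ih, List.filter_cons]
    · simp [List.foldl_cons, h, ih, List.filter_cons]

-- ===== VERDICT (by name: the statement is the Claim_ definition above) =====
theorem sort_keys_spec : Claim_equal_sort_keys := by
  intro keys _
  show sort_keys keys = sort_keys_alt keys
  unfold sort_keys sort_keys_alt
  rw [foldl_pair_partition, PySem.List.foldl_append_if_eq_filter,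
    PySem.List.foldl_append_if_eq_filter]
  simp
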